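-- pv_equiv track=rewrite | github.com/AnderssonProgramming/AYED-resources | FIRST TERM/LABS/lab02/HADAMARD.py | check_hadamard
-- ===== SOURCE A (Python) =====
-- def power_of_two(n):
--     return (n != 0) and (n & (n - 1) == 0)  # forma eficiente
--
-- def hadamard(matrix, n):                                                             #Cost (O)    #Times (O)  #Cost (Ohm)    #Times (Ohm)
--     if n == 1:                                                                       #c1             1            c1             1
--         return matrix[0][0]        #Caso base cuando tamaño matriz = 1               #c2             1            c2             1
--     for i in range(n):                                                               #c3             n            c3             1
--         for j in range(i + 1, n):                                                    #c4            n+1           c4             1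
--             if sum(matrix[i][k] != matrix[j][k] for k in range(n)) != n / 2:         #c5             n            c5             n
--                 return False                                                         #c6             1            c6             1
--     return True                                                                      #c7             1            c7             1
--
-- def check_hadamard(n, values):
--     if not power_of_two(n):
--         return "Imposible"        #Primer caso cuando la matriz Hadamard es imposible de hacer (depende: tam, elementos)
--     matrix = crear_matriz(n)       #Cuando no es potencia de 2, el tamaño de la matriz
--     for i in range(n):
--         for j in range(n):
--             matrix[i][j] = values[i * n + j] == 'T'
--     return "Hadamard" if hadamard(matrix, n) else "No Hadamard" #Los otros dos casos cuando es potencia de 2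
--
-- def crear_matriz(tam):
--     matriz = [[False] * tam for _ in range(tam)]
--     return matriz
-- ===== SOURCE B (Python) =====
-- def check_hadamard(n, values):
--     if n <= 0 or n & (n - 1) != 0:
--         return "Imposible"
--     if n == 1:
--         return "Hadamard" if values[0] == 'T' else "No Hadamard"
--     # Orthogonality test on +/-1 entries: accumulate the Gram dot product of every
--     # row pair column by column, then require all off-diagonal dots to be zero.
--     pairs = [(i, j) for i in range(n) for j in range(i + 1, n)]
--     dots = [0] * len(pairs)
--     for k in range(n):
--         col = [1 if values[i * n + k] == 'T' else -1 for i in range(n)]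
--         dots = [d + col[i] * col[j] for d, (i, j) in zip(dots, pairs)]
--     return "Hadamard" if all(d == 0 for d in dots) else "No Hadamard"
-- ===== Notes on version B (the rewrite author's own statement) =====
-- stated objective: alternative
-- what changed: B replaces A's pair-by-pair mismatch counting (outer loops over row pairs, inner scan comparing booleans against n/2) with the orthogonality form of the Hadamard condition: it maps entries to +1/-1 and accumulates the Gram dot product of every row pair column-by-column (column-outermost traversal, no early exit), finally requiring all off-diagonal dots to be 0.
import Mathlib
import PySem

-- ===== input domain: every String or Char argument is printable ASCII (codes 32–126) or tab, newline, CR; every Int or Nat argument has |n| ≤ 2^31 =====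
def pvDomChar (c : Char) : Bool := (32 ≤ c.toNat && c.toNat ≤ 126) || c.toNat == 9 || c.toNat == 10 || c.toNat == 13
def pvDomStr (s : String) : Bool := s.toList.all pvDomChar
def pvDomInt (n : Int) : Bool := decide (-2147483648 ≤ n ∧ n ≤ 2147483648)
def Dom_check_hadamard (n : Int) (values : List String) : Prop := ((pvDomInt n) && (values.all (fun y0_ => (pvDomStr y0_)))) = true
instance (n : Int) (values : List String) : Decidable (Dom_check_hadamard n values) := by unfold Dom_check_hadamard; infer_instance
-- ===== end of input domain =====

-- B replaces A's pairwise mismatch-count scan with the orthogonality form of the Hadamard test: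
-- entries become +1/-1 and the Gram dot product of every row pair is accumulated column-by-column,
-- then all off-diagonal dots must be 0 (objective: alternative).

-- ===== PORT A =====
def pvPow2 (n : Int) : Bool := (n != 0) && (PySem.Int.band n (n - 1) == 0)

def crear_matriz (tam : Int) : List (List Bool) :=
  (PySem.List.pyRange 0 tam 1).map (fun _ => PySem.List.pyRepeat [false] tam)

-- sum(matrix[i][k] != matrix[j][k] for k in range(n)); matrix indices are in range by
-- construction (crear_matriz builds an n×n matrix), so pyGetD is exact here.
def pvMismatch (matrix : List (List Bool)) (n i j : Int) : Int :=
  (PySem.List.pyRange 0 n 1).foldl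
    (fun s k => s + (if (PySem.List.pyGetD (PySem.List.pyGetD matrix i []) k false)
                      != (PySem.List.pyGetD (PySem.List.pyGetD matrix j []) k false)
                     then 1 else 0)) 0

-- inner 'for j in range(i+1, n)' with early 'return False'
def pvHadLoopJ (matrix : List (List Bool)) (n i : Int) (js : List Int) : Bool :=
  match js with
  | [] => true
  | j :: rest =>
    -- 'sum(...) != n / 2': n is an even power of two whenever this line runs, so the
    -- float comparison is exactly integer comparison with n // 2.
    if pvMismatch matrix n i j != PySem.Int.floordiv n 2 then false
    else pvHadLoopJ matrix n i rest

def pvHadLoopI (matrix : List (List Bool)) (n : Int) (is : List Int) : Bool :=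
  match is with
  | [] => true
  | i :: rest =>
    if pvHadLoopJ matrix n i (PySem.List.pyRange (i + 1) n 1) then pvHadLoopI matrix n rest
    else false

def hadamard (matrix : List (List Bool)) (n : Int) : Bool :=
  if n == 1 then PySem.List.pyGetD (PySem.List.pyGetD matrix 0 []) 0 false  -- matrix[0][0], in range by construction
  else pvHadLoopI matrix n (PySem.List.pyRange 0 n 1)

-- the nested build loops 'matrix[i][j] = values[i*n+j] == "T"'; only values[i*n+j] can raise
def pvBuild (n : Int) (values : List String) : Option (List (List Bool)) :=
  (PySem.List.pyRange 0 n 1).foldl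
    (fun acc i => acc.bind (fun m =>
      (PySem.List.pyRange 0 n 1).foldl
        (fun acc2 j => acc2.bind (fun m2 =>
          (PySem.List.pyGet? values (i * n + j)).map (fun v =>
            PySem.List.pySetD m2 i
              (PySem.List.pySetD (PySem.List.pyGetD m2 i []) j (v == "T")))))
        (some m)))
    (some (crear_matriz n))

def check_hadamard (n : Int) (values : List String) : String :=
  if !(pvPow2 n) then "Imposible"
  else
    match pvBuild n values with
    | none => ""   -- IndexError (values shorter than n*n); excluded by Pre_
    | some matrix => if hadamard matrix n then "Hadamard" else "No Hadamard"

-- ===== PORT B =====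
-- col = [1 if values[i*n+k] == 'T' else -1 for i in range(n)]; values[...] can raise
def pvCol (n : Int) (values : List String) (k : Int) : Option (List Int) :=
  (PySem.List.pyRange 0 n 1).foldl
    (fun acc i => acc.bind (fun c =>
      (PySem.List.pyGet? values (i * n + k)).map
        (fun v => c ++ [if v == "T" then (1 : Int) else -1])))
    (some [])

-- pairs = [(i, j) for i in range(n) for j in range(i+1, n)]
def pvPairs (n : Int) : List (Int × Int) :=
  (PySem.List.pyRange 0 n 1).flatMap
    (fun i => (PySem.List.pyRange (i + 1) n 1).map (fun j => (i, j)))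

-- the column loop: dots = [d + col[i]*col[j] for d,(i,j) in zip(dots, pairs)], starting [0]*len(pairs);
-- col[i]/col[j] are in range by construction (col has one entry per row index), so pyGetD is exact.
def pvDots (n : Int) (values : List String) : Option (List Int) :=
  (PySem.List.pyRange 0 n 1).foldl
    (fun acc k => acc.bind (fun ds =>
      (pvCol n values k).map (fun col =>
        List.zipWith
          (fun d p => d + PySem.List.pyGetD col p.1 0 * PySem.List.pyGetD col p.2 0)
          ds (pvPairs n))))
    (some (List.replicate (pvPairs n).length 0))

def check_hadamard_alt (n : Int) (values : List String) : String :=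
  if n ≤ 0 ∨ PySem.Int.band n (n - 1) ≠ 0 then "Imposible"
  else if n == 1 then
    match PySem.List.pyGet? values 0 with
    | some v => if v == "T" then "Hadamard" else "No Hadamard"
    | none => ""   -- IndexError; excluded by Pre_
  else
    match pvDots n values with
    | none => ""   -- IndexError; excluded by Pre_
    | some ds => if ds.all (fun d => d == 0) then "Hadamard" else "No Hadamard"

-- ===== PRECONDITION & SPEC =====
-- Pre_ excludes exactly the inputs where A raises IndexError: n a positive power of two
-- but values shorter than n*n.
def Pre_check_hadamard (n : Int) (values : List String) : Prop :=
  (n ≠ 0 ∧ PySem.Int.band n (n - 1) = 0) → n * n ≤ (values.length : Int)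
instance (n : Int) (values : List String) : Decidable (Pre_check_hadamard n values) := by
  unfold Pre_check_hadamard; infer_instance

def pvWitness_check_hadamard : Int × List String := (2, ["T", "T", "T", "F"])

def Spec_check_hadamard (n : Int) (values : List String) (out : String) : Prop := out = check_hadamard_alt n values
instance (n : Int) (values : List String) (out : String) : Decidable (Spec_check_hadamard n values out) := by unfold Spec_check_hadamard; infer_instance

-- ===== CLAIM (what is proved, stated in full; the proofs are below) =====
def Claim_equal_check_hadamard : Prop := ∀ (n : Int) (values : List String), Dom_check_hadamard n values → Pre_check_hadamard n values → Spec_check_hadamard n values (check_hadamard n values)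

-- ===== LEMMAS AND PROOFS =====

def pvF (values : List String) (t : Nat) : Bool := values.getD t "" == "T"

def pvSgn (values : List String) (t : Nat) : Int := if pvF values t then 1 else -1

def pvMat (values : List String) (N : Nat) : List (List Bool) :=
  (List.range N).map (fun i => (List.range N).map (fun j => pvF values (i * N + j)))

def pvColN (values : List String) (N k : Nat) : List Int :=
  (List.range N).map (fun i => pvSgn values (i * N + k))

theorem pvOptFold {α β : Type} (xs : List α) (step : β → α → Option β) (p : β → α → β)
    (h : ∀ x ∈ xs, ∀ s, step s x = some (p s x)) (s0 : β) :
    xs.foldl (fun a x => a.bind (fun s => step s x)) (some s0) = some (xs.foldl p s0) := by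
  induction xs generalizing s0 with
  | nil => rfl
  | cons x t ih =>
    simp only [List.foldl_cons, Option.bind_some, h x (by simp) s0]
    exact ih (fun y hy s => h y (by simp [hy]) s) _

theorem pvSetFold_length {α : Type} (g : Nat → α) (js : List Nat) (r : List α) :
    (js.foldl (fun r j => r.set j (g j)) r).length = r.length := by
  induction js generalizing r with
  | nil => rfl
  | cons j rest ih => simp [List.foldl_cons, ih, List.length_set]

theorem pvSetFold_getD (g : Nat → Bool) (js : List Nat) (r : List Bool) (t : Nat)
    (hj : ∀ j ∈ js, j < r.length) :
    (js.foldl (fun r j => r.set j (g j)) r).getD t false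
    = if t ∈ js then g t else r.getD t false := by
  induction js generalizing r with
  | nil => simp
  | cons j rest ih =>
    rw [List.foldl_cons, ih (r.set j (g j))
      (fun a ha => by rw [List.length_set]; exact hj a (List.mem_cons_of_mem _ ha))]
    by_cases hm : t ∈ rest
    · simp [hm]
    · by_cases he : t = j
      · subst he
        simp [hm, List.getD_eq_getElem?_getD, List.getElem?_set_self (hj t (List.mem_cons_self))]
      · simp [hm, he, List.getD_eq_getElem?_getD, List.getElem?_set_ne (by omega : j ≠ t)]

theorem pvRowFold_eq_map (g : Nat → Bool) (N : Nat) (r : List Bool) (hr : r.length = N) :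
    (List.range N).foldl (fun r j => r.set j (g j)) r = (List.range N).map g := by
  apply List.ext_getElem (by simp [pvSetFold_length, hr])
  intro i h1 h2
  have hiN : i < N := by simpa using h2
  rw [← List.getD_eq_getElem _ false h1, ← List.getD_eq_getElem _ false h2,
    pvSetFold_getD g _ r i (fun j hj => by rw [hr]; simpa using hj),
    if_pos (List.mem_range.mpr hiN), PySem.List.getD_map_range g N i false hiN]

theorem pvMatFold (g : Nat → Bool) (i : Nat) (js : List Nat) :
    ∀ (m : List (List Bool)), i < m.length →
    js.foldl (fun m2 j => m2.set i ((m2.getD i []).set j (g j))) m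
    = m.set i (js.foldl (fun r j => r.set j (g j)) (m.getD i [])) := by
  induction js with
  | nil =>
    intro m him
    simp only [List.foldl_nil]
    rw [List.getD_eq_getElem _ _ him, List.set_getElem_self]
  | cons j rest ih =>
    intro m him
    rw [List.foldl_cons, ih _ (by simpa using him), List.set_set, List.foldl_cons]
    congr 2
    rw [List.getD_eq_getElem?_getD, List.getElem?_set_self him]
    rfl

theorem pvOuterFold (R : List Bool → Nat → List Bool) (is : List Nat) :
    ∀ (m0 : List (List Bool)), is.Nodup → (∀ i ∈ is, i < m0.length) → ∀ t,
    ((is.foldl (fun m i => m.set i (R (m.getD i []) i)) m0).getD t [])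
    = if t ∈ is then R (m0.getD t []) t else m0.getD t [] := by
  induction is with
  | nil => intro m0 _ _ t; simp
  | cons i rest ih =>
    intro m0 hnd hlt t
    have hinr : i ∉ rest := (List.nodup_cons.mp hnd).1
    rw [List.foldl_cons,
      ih _ (List.nodup_cons.mp hnd).2
        (fun a ha => by rw [List.length_set]; exact hlt a (List.mem_cons_of_mem _ ha)) t]
    have him : i < m0.length := hlt i List.mem_cons_self
    by_cases hm : t ∈ rest
    · have hne : t ≠ i := fun h => hinr (h ▸ hm)
      simp only [hm, if_pos, List.mem_cons, hm, or_true, if_pos]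
      rw [List.getD_eq_getElem?_getD, List.getElem?_set_ne (by omega : i ≠ t),
        ← List.getD_eq_getElem?_getD]
    · by_cases he : t = i
      · subst he
        simp only [hm, if_neg, List.mem_cons, true_or, if_pos]
        rw [List.getD_eq_getElem?_getD, List.getElem?_set_self him]
        rfl
      · simp only [hm, if_neg, List.mem_cons, he, false_or, if_neg hm]
        rw [List.getD_eq_getElem?_getD, List.getElem?_set_ne (by omega : i ≠ t),
          ← List.getD_eq_getElem?_getD]

theorem pvFoldlCongrInv {α β : Type} (xs : List α) (f g : β → α → β) (Inv : β → Prop)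
    (hfg : ∀ s x, x ∈ xs → Inv s → f s x = g s x) (hInv : ∀ s x, Inv s → Inv (g s x))
    (s0 : β) (h0 : Inv s0) : xs.foldl f s0 = xs.foldl g s0 := by
  induction xs generalizing s0 with
  | nil => rfl
  | cons x t ih =>
    rw [List.foldl_cons, List.foldl_cons, hfg s0 x (by simp) h0]
    exact ih (fun s y hy hs => hfg s y (by simp [hy]) hs) _ (hInv s0 x h0)

theorem pvCrear (N : Nat) : crear_matriz (N : Int) = List.replicate N (List.replicate N false) := by
  unfold crear_matriz
  rw [PySem.List.pyRepeat_singleton, PySem.List.pyRange_zero_nat, List.map_map]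
  have hc : ((fun _ : Int => List.replicate (((N : Int)).toNat) false) ∘ fun k : Nat => (k : Int))
      = fun _ : Nat => List.replicate N false := funext (fun _ => by simp)
  rw [hc, List.map_const', List.length_range]

theorem pvIdxLt (N i j : Nat) (hi : i < N) (hj : j < N) : i * N + j < N * N := by
  have h1 : i * N + j < (i + 1) * N := by
    have := Nat.add_mul i 1 N; omega
  have h2 : (i + 1) * N ≤ N * N := Nat.mul_le_mul_right N (by omega)
  omega

theorem pvGetVal (values : List String) (N i j : Nat) (hlen : N * N ≤ values.length)
    (hi : i < N) (hj : j < N) :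
    PySem.List.pyGet? values ((i : Int) * (N : Int) + (j : Int)) = some (values.getD (i * N + j) "") := by
  have hidx : i * N + j < values.length := lt_of_lt_of_le (pvIdxLt N i j hi hj) hlen
  rw [show (i : Int) * (N : Int) + (j : Int) = ((i * N + j : Nat) : Int) by push_cast; ring,
    PySem.List.pyGet?_natCast, List.getElem?_eq_getElem hidx, List.getD_eq_getElem _ _ hidx]

theorem pvOuterFold_length (R : List Bool → Nat → List Bool) (is : List Nat) :
    ∀ m0 : List (List Bool),
    (is.foldl (fun m i => m.set i (R (m.getD i []) i)) m0).length = m0.length := by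
  induction is with
  | nil => intro m0; rfl
  | cons i rest ih => intro m0; rw [List.foldl_cons, ih, List.length_set]

theorem pvBuild_eq (N : Nat) (values : List String) (hlen : N * N ≤ values.length) :
    pvBuild (N : Int) values = some (pvMat values N) := by
  unfold pvBuild
  simp only [PySem.List.pyRange_zero_nat, List.foldl_map]
  rw [pvOptFold (List.range N) _
      (fun m i => (List.range N).foldl
        (fun m2 j => m2.set i ((m2.getD i []).set j (pvF values (i * N + j)))) m)
      (fun i hi m => by
        rw [pvOptFold (List.range N) _
            (fun m2 j => m2.set i ((m2.getD i []).set j (pvF values (i * N + j))))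
            (fun j hj m2 => by
              rw [pvGetVal values N i j hlen (List.mem_range.mp hi) (List.mem_range.mp hj)]
              simp only [Option.map_some, PySem.List.pySetD_natCast, PySem.List.pyGetD_natCast]
              rfl) m])]
  congr 1
  rw [pvFoldlCongrInv (List.range N) _
      (fun m i => m.set i ((List.range N).foldl (fun r j => r.set j (pvF values (i * N + j)))
        (m.getD i []))) (fun m => m.length = N)
      (fun m i hi hm => pvMatFold (fun j => pvF values (i * N + j)) i (List.range N) m
        (by have hm' : m.length = N := hm; rw [hm']; exact List.mem_range.mp hi))
      (fun m i hm => by simpa using hm)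
      _ (by rw [pvCrear]; exact List.length_replicate)]
  apply List.ext_getElem
  · rw [pvOuterFold_length
        (fun r i => (List.range N).foldl (fun r j => r.set j (pvF values (i * N + j))) r)
        (List.range N) (crear_matriz (N : Int))]
    simp [pvCrear, pvMat]
  · intro t h1 h2
    have htN : t < N := by simpa [pvMat] using h2
    rw [← List.getD_eq_getElem _ [] h1, ← List.getD_eq_getElem _ [] h2]
    rw [pvOuterFold
        (fun r i => (List.range N).foldl (fun r j => r.set j (pvF values (i * N + j))) r)
        (List.range N) (crear_matriz (N : Int)) List.nodup_range
        (fun i hi => by rw [pvCrear, List.length_replicate]; exact List.mem_range.mp hi) t,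
      if_pos (List.mem_range.mpr htN)]
    have hc : (crear_matriz (N : Int)).getD t [] = List.replicate N false := by
      rw [pvCrear, List.getD_eq_getElem _ [] (by simpa using htN), List.getElem_replicate]
    rw [hc, pvRowFold_eq_map _ N _ List.length_replicate,
      pvMat, PySem.List.getD_map_range _ N t [] htN]

theorem pvMismatch_eq (values : List String) (N : Nat) (a b : Nat) (ha : a < N) (hb : b < N) :
    pvMismatch (pvMat values N) (N : Int) (a : Int) (b : Int)
    = ((List.range N).countP (fun k => pvF values (a * N + k) != pvF values (b * N + k)) : Int) := by
  unfold pvMismatch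
  simp only [PySem.List.pyRange_zero_nat, List.foldl_map, PySem.List.pyGetD_natCast]
  have hrow : ∀ c : Nat, c < N →
      (pvMat values N).getD c [] = (List.range N).map (fun j => pvF values (c * N + j)) :=
    fun c hc => by rw [pvMat, PySem.List.getD_map_range _ N c [] hc]
  have hcongr := PySem.List.foldl_congr_mem
      (l := List.range N) (init := (0 : Int))
      (f := fun (s : Int) (k : Nat) =>
        s + if (((pvMat values N).getD a []).getD k false
                != ((pvMat values N).getD b []).getD k false) then 1 else 0)
      (g := fun (s : Int) (k : Nat) =>
        if (pvF values (a * N + k) != pvF values (b * N + k)) then s + 1 else s)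
      (by
        intro acc x hx
        simp only [hrow a ha, hrow b hb,
          PySem.List.getD_map_range _ N x false (List.mem_range.mp hx)]
        by_cases hc : pvF values (a * N + x) != pvF values (b * N + x) <;> simp [hc])
  rw [hcongr, PySem.List.foldl_if_add_one, zero_add]

theorem pvBandNeg (n : Int) (h : n < 0) : PySem.Int.band n (n - 1) < 0 := by
  simp only [PySem.Int.band]
  split_ifs with h1 h2 h2 <;> omega

-- A's loops with early return are just List.all
theorem pvLoopJ_all (m : List (List Bool)) (n i : Int) (js : List Int) :
    pvHadLoopJ m n i js = js.all (fun j => pvMismatch m n i j == PySem.Int.floordiv n 2) := by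
  induction js with
  | nil => rfl
  | cons j rest ih =>
    unfold pvHadLoopJ
    rw [List.all_cons, ← ih]
    have hb2 : (pvMismatch m n i j != PySem.Int.floordiv n 2)
        = !(pvMismatch m n i j == PySem.Int.floordiv n 2) := rfl
    cases hb : (pvMismatch m n i j == PySem.Int.floordiv n 2)
    · simp only [hb2, hb, Bool.not_false, if_true, Bool.false_and]
    · simp only [hb2, hb, Bool.not_true, Bool.false_eq_true, if_false, Bool.true_and]

theorem pvLoopI_all (m : List (List Bool)) (n : Int) (is : List Int) :
    pvHadLoopI m n is
    = is.all (fun i => pvHadLoopJ m n i (PySem.List.pyRange (i + 1) n 1)) := by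
  induction is with
  | nil => rfl
  | cons i rest ih =>
    unfold pvHadLoopI
    by_cases h : pvHadLoopJ m n i (PySem.List.pyRange (i + 1) n 1) <;> simp [h, ih]

-- B-side: the column comprehension
theorem pvCol_eq (N : Nat) (values : List String) (hlen : N * N ≤ values.length)
    (k : Nat) (hk : k < N) :
    pvCol (N : Int) values (k : Int) = some (pvColN values N k) := by
  unfold pvCol
  simp only [PySem.List.pyRange_zero_nat, List.foldl_map]
  rw [pvOptFold (List.range N) _
      (fun (c : List Int) i => c ++ [pvSgn values (i * N + k)])
      (fun i hi c => by
        rw [pvGetVal values N i k hlen (List.mem_range.mp hi) hk]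
        simp only [Option.map_some]
        rfl)]
  rw [PySem.List.foldl_append_singleton_eq_map]
  rfl

theorem pvZipSelf {κ : Type} (f : κ → Int × Int → Int) (k : κ) (g : Int × Int → Int) :
    ∀ l : List (Int × Int),
    List.zipWith (fun d p => d + f k p) (l.map g) l = l.map (fun p => g p + f k p) := by
  intro l
  induction l with
  | nil => rfl
  | cons q t iht => simp [List.zipWith, iht]

-- the zipWith column accumulation over a fixed pair list is a pointwise fold
theorem pvZipFold {κ : Type} (pairs : List (Int × Int)) (f : κ → Int × Int → Int)
    (ks : List κ) : ∀ g : Int × Int → Int,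
    ks.foldl (fun ds k => List.zipWith (fun d p => d + f k p) ds pairs) (pairs.map g)
    = pairs.map (fun p => ks.foldl (fun s k => s + f k p) (g p)) := by
  induction ks with
  | nil => intro g; rfl
  | cons k rest ih =>
    intro g
    simp only [List.foldl_cons, pvZipSelf f k g pairs, ih]

theorem pvDots_eq (N : Nat) (values : List String) (hlen : N * N ≤ values.length) :
    pvDots (N : Int) values
    = some ((pvPairs (N : Int)).map (fun p =>
        (List.range N).foldl
          (fun s k => s + PySem.List.pyGetD (pvColN values N k) p.1 0
                        * PySem.List.pyGetD (pvColN values N k) p.2 0) 0)) := by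
  unfold pvDots
  simp only [PySem.List.pyRange_zero_nat, List.foldl_map]
  rw [pvOptFold (List.range N) _
      (fun (ds : List Int) k => List.zipWith
        (fun d p => d + PySem.List.pyGetD (pvColN values N k) p.1 0
                      * PySem.List.pyGetD (pvColN values N k) p.2 0) ds (pvPairs (N : Int)))
      (fun k hk ds => by
        rw [pvCol_eq N values hlen k (List.mem_range.mp hk)]
        rfl)]
  rw [show List.replicate (pvPairs (N : Int)).length (0 : Int)
        = (pvPairs (N : Int)).map (fun _ => (0 : Int)) by
      rw [List.map_const'],
    pvZipFold (pvPairs (N : Int))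
      (fun k p => PySem.List.pyGetD (pvColN values N k) p.1 0
                * PySem.List.pyGetD (pvColN values N k) p.2 0) (List.range N) (fun _ => 0)]

-- signed fold = length - 2 * mismatch count
theorem pvSignSum (P : Nat → Bool) (ks : List Nat) : ∀ a : Int,
    ks.foldl (fun s k => s + (if P k then (-1 : Int) else 1)) a
    = a + (ks.length : Int) - 2 * (ks.countP P : Int) := by
  induction ks with
  | nil => intro a; simp
  | cons k rest ih =>
    intro a
    rw [List.foldl_cons, ih, List.length_cons, List.countP_cons]
    by_cases h : P k <;> simp [h] <;> push_cast <;> ring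

theorem pvSgn_mul (values : List String) (s t : Nat) :
    pvSgn values s * pvSgn values t = (if pvF values s != pvF values t then (-1 : Int) else 1) := by
  unfold pvSgn
  by_cases h1 : pvF values s <;> by_cases h2 : pvF values t <;> simp [h1, h2]

-- per-pair: dot product zero iff mismatch count is N/2 (N even)
theorem pvPair_eq (values : List String) (N : Nat) (heven : N % 2 = 0)
    (a b : Nat) (ha : a < N) (hb : b < N) :
    ((List.range N).foldl
        (fun s k => s + PySem.List.pyGetD (pvColN values N k) (a : Int) 0
                      * PySem.List.pyGetD (pvColN values N k) (b : Int) 0) 0 == 0)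
    = (pvMismatch (pvMat values N) (N : Int) (a : Int) (b : Int)
        == PySem.Int.floordiv (N : Int) 2) := by
  have hget : ∀ (c : Nat), c < N → ∀ k ∈ List.range N,
      PySem.List.pyGetD (pvColN values N k) (c : Int) 0 = pvSgn values (c * N + k) := by
    intro c hc k hk
    rw [pvColN, PySem.List.pyGetD_natCast, PySem.List.getD_map_range _ N c 0 hc]
  have hfold : (List.range N).foldl
      (fun s k => s + PySem.List.pyGetD (pvColN values N k) (a : Int) 0
                    * PySem.List.pyGetD (pvColN values N k) (b : Int) 0) 0
      = (N : Int) - 2 * ((List.range N).countP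
          (fun k => pvF values (a * N + k) != pvF values (b * N + k)) : Int) := by
    have hcongr := PySem.List.foldl_congr_mem
        (l := List.range N) (init := (0 : Int))
        (f := fun (s : Int) (k : Nat) =>
          s + PySem.List.pyGetD (pvColN values N k) (a : Int) 0
            * PySem.List.pyGetD (pvColN values N k) (b : Int) 0)
        (g := fun (s : Int) (k : Nat) =>
          s + (if pvF values (a * N + k) != pvF values (b * N + k) then (-1 : Int) else 1))
        (by intro s k hk; simp only [hget a ha k hk, hget b hb k hk, pvSgn_mul])
    rw [hcongr, pvSignSum]
    simp
  rw [hfold, pvMismatch_eq values N a b ha hb,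
    PySem.Int.floordiv_eq_ediv_of_pos (by omega : (0 : Int) < 2)]
  set c := (List.range N).countP (fun k => pvF values (a * N + k) != pvF values (b * N + k))
  have hcle : c ≤ N := by
    simpa using List.countP_le_length
      (p := fun k => pvF values (a * N + k) != pvF values (b * N + k)) (l := List.range N)
  by_cases h : (c : Int) = (N : Int) / 2
  · rw [h]
    have : (N : Int) - 2 * ((N : Int) / 2) = 0 := by omega
    simp [this]
  · have h2 : (N : Int) - 2 * (c : Int) ≠ 0 := by omega
    simp [h, h2]

-- guard arithmetic: a positive power of two ≥ 2 is even
theorem pvEven (N : Nat) (h2 : 2 ≤ N) (hband : N &&& (N - 1) = 0) : N % 2 = 0 := by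
  by_contra hodd
  have hN : N % 2 = 1 := by omega
  set m := N / 2 with hm
  have hm1 : 1 ≤ m := by omega
  have hex : ∃ t, m.testBit t = true := by
    by_contra hall
    push_neg at hall
    have : m = 0 := Nat.eq_of_testBit_eq (fun t => by simp [hall t, Nat.zero_testBit])
    omega
  obtain ⟨t, ht⟩ := hex
  have hNt : N.testBit (t + 1) = true := by
    rw [Nat.testBit_succ]
    exact hm ▸ ht
  have hN1t : (N - 1).testBit (t + 1) = true := by
    rw [Nat.testBit_succ]
    have : (N - 1) / 2 = m := by omega
    rw [this]; exact ht
  have := congrArg (fun x => x.testBit (t + 1)) hband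
  simp only [Nat.testBit_and, hNt, hN1t, Nat.zero_testBit, Bool.and_true] at this
  exact Bool.noConfusion this

theorem pvAllCongr {α : Type} (l : List α) (p q : α → Bool)
    (h : ∀ x ∈ l, p x = q x) : l.all p = l.all q := by
  induction l with
  | nil => rfl
  | cons x t ih =>
    rw [List.all_cons, List.all_cons, h x (by simp), ih (fun y hy => h y (by simp [hy]))]

-- the main bridge between the two loop structures
theorem pvMain (values : List String) (N : Nat) (h2 : 2 ≤ N) (heven : N % 2 = 0)
    (hlen : N * N ≤ values.length) :
    pvHadLoopI (pvMat values N) (N : Int) (PySem.List.pyRange 0 (N : Int) 1)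
    = ((pvPairs (N : Int)).map (fun p =>
        (List.range N).foldl
          (fun s k => s + PySem.List.pyGetD (pvColN values N k) p.1 0
                        * PySem.List.pyGetD (pvColN values N k) p.2 0) 0)).all
        (fun d => d == 0) := by
  rw [pvLoopI_all, List.all_map, pvPairs, List.all_flatMap]
  apply pvAllCongr
  intro i hi
  rw [pvLoopJ_all, List.all_map]
  apply pvAllCongr
  intro j hj
  have hib := PySem.List.mem_pyRange_one.mp hi
  have hjb := PySem.List.mem_pyRange_one.mp hj
  have hia : i = ((i.toNat : Nat) : Int) := (Int.toNat_of_nonneg hib.1).symm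
  have hja : j = ((j.toNat : Nat) : Int) := (Int.toNat_of_nonneg (by omega : (0:Int) ≤ j)).symm
  simp only [Function.comp]
  rw [hia, hja, pvPair_eq values N heven i.toNat j.toNat (by omega) (by omega)]

-- ===== VERDICT (by name: the statement is the Claim_ definition above) =====
theorem check_hadamard_spec : Claim_equal_check_hadamard := by
  intro n values _ hpre
  unfold Spec_check_hadamard check_hadamard check_hadamard_alt pvPow2
  cases hpb : ((n != 0) && (PySem.Int.band n (n - 1) == 0)) with
  | false =>
    have hcond : n = 0 ∨ PySem.Int.band n (n - 1) ≠ 0 := by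
      rcases Bool.and_eq_false_iff.mp hpb with h | h
      · left; simpa using h
      · right; simpa using h
    have hg : n ≤ 0 ∨ PySem.Int.band n (n - 1) ≠ 0 := by
      rcases hcond with h | h
      · exact Or.inl (by omega)
      · exact Or.inr h
    rw [if_pos (by simp : (!false) = true), if_pos hg]
  | true =>
    have hcond : ¬ n = 0 ∧ PySem.Int.band n (n - 1) = 0 := by simpa using hpb
    have hpos : 0 < n := by
      rcases lt_trichotomy n 0 with h | h | h
      · exact absurd hcond.2 (by have := pvBandNeg n h; omega)
      · exact absurd h hcond.1
      · exact h
    rw [if_neg (by simp : ¬ (!true) = true),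
      if_neg (show ¬ (n ≤ 0 ∨ PySem.Int.band n (n - 1) ≠ 0) by
        push_neg; exact ⟨by omega, hcond.2⟩)]
    obtain ⟨N, rfl⟩ : ∃ N : Nat, n = (N : Int) := ⟨n.toNat, (Int.toNat_of_nonneg (le_of_lt hpos)).symm⟩
    have hNpos : 0 < N := by exact_mod_cast hpos
    have hlen : N * N ≤ values.length := by
      have h := hpre ⟨hcond.1, hcond.2⟩
      have : ((N * N : Nat) : Int) ≤ (values.length : Int) := by push_cast; push_cast at h; linarith
      exact_mod_cast this
    rw [pvBuild_eq N values hlen]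
    by_cases h1 : N = 1
    · subst h1
      have e1 : ((((1 : Nat) : Int)) == 1) = true := by decide
      unfold hadamard
      simp only [e1, if_true]
      have hv : PySem.List.pyGet? values 0 = some (values.getD 0 "") := by
        rw [PySem.List.pyGet?_zero, List.getElem?_eq_getElem (by omega),
          List.getD_eq_getElem _ _ (by omega)]
      have hm1 : pvMat values 1 = [[pvF values 0]] := by
        simp [pvMat, List.range_one]
      rw [hv, hm1, PySem.List.pyGetD_zero_cons, PySem.List.pyGetD_zero_cons]
      rfl
    · have e1 : ((((N : Nat) : Int)) == 1) = false := by simp; omega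
      have h2 : 2 ≤ N := by omega
      have hband : N &&& (N - 1) = 0 := by
        have hc := hcond.2
        rw [show (N : Int) - 1 = ((N - 1 : Nat) : Int) by push_cast [h2]; omega] at hc
        rw [PySem.Int.band_natCast] at hc
        exact_mod_cast hc
      have heven : N % 2 = 0 := pvEven N h2 hband
      unfold hadamard
      simp only [e1, Bool.false_eq_true, if_false]
      rw [pvDots_eq N values hlen, pvMain values N h2 heven hlen]
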